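-- pv_equiv track=rewrite | github.com/LizaTretyakova-zz/QuestionAnsweringSystem | src/answer_maker.py | country_str
-- ===== SOURCE A (Python) =====
-- def country_str(countries):
--     result = ""
--     for country in countries:
--         if result is "":
--             result += " in " + country
--         else:
--             result += " and " + country
--     return result
-- ===== SOURCE B (Python) =====
-- def country_str(countries):
--     items = list(countries)
--     if not items:
--         return ""
--     return " in " + " and ".join(items)
-- ===== Notes on version B (the rewrite author's own statement) =====
-- stated objective: idiomatic
-- what changed: Replaces the accumulator loop with its first-iteration branch by an emptiness guard plus a single ' and '.join with ' in ' prepended once; the single join avoids repeated string concatenation.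
import Mathlib
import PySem

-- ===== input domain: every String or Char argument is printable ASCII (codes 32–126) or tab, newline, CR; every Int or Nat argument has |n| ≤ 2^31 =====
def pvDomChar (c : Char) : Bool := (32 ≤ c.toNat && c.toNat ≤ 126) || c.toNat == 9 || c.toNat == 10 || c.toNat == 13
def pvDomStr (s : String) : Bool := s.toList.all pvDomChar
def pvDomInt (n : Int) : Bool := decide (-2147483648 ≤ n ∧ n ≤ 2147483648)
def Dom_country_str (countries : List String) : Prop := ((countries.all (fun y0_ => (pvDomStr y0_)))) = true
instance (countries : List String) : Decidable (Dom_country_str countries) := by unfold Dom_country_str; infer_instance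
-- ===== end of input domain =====

-- B replaces A's accumulator loop (with its first-iteration branch) by an emptiness guard
-- plus a single " and ".join with " in " prepended once (idiomatic).


-- ===== PORT A =====
-- 'result is ""' in CPython is identity on the interned empty string: true exactly when result = ""
def country_str (countries : List String) : String :=
  countries.foldl
    (fun result country =>
      if result = "" then result ++ " in " ++ country
      else result ++ " and " ++ country)
    ""

-- ===== PORT B =====
def country_str_alt (countries : List String) : String :=
  match countries with
  | [] => ""
  | items => " in " ++ PySem.Str.join " and " items

-- ===== PRECONDITION & SPEC =====
def Spec_country_str (countries : List String) (out : String) : Prop := out = country_str_alt countries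
instance (countries : List String) (out : String) : Decidable (Spec_country_str countries out) := by unfold Spec_country_str; infer_instance

-- ===== CLAIM (what is proved, stated in full; the proofs are below) =====
def Claim_equal_country_str : Prop := ∀ (countries : List String), Dom_country_str countries → Spec_country_str countries (country_str countries)

-- ===== LEMMAS AND PROOFS =====
lemma country_str_tail (rest : List String) (acc : String) (h : acc.toList ≠ []) :
    (List.foldl
      (fun result country =>
        if result = "" then result ++ " in " ++ country
        else result ++ " and " ++ country)
      acc rest).toList
    = acc.toList ++ rest.flatMap (fun x => (" and ").toList ++ x.toList) := by
  induction rest generalizing acc with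
  | nil => simp
  | cons x t ih =>
    have hne : acc ≠ "" := by
      intro h'; apply h; rw [h']; rfl
    simp only [List.foldl_cons, if_neg hne]
    rw [ih]
    · simp
    · simp

lemma join_and_eq (c : List Char) (t : List (List Char)) :
    PySem.Chars.join [' ', 'a', 'n', 'd', ' '] (c :: t)
    = c ++ t.flatMap (fun x => [' ', 'a', 'n', 'd', ' '] ++ x) := by
  induction t generalizing c with
  | nil => simp [PySem.Chars.join_singleton]
  | cons y t ih =>
    rw [PySem.Chars.join_cons_cons, ih y]
    simp

-- ===== VERDICT (by name: the statement is the Claim_ definition above) =====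
theorem country_str_spec : Claim_equal_country_str := by
  intro countries _
  unfold Spec_country_str country_str country_str_alt
  match countries with
  | [] => rfl
  | c :: t =>
    apply String.toList_injective
    simp only [List.foldl_cons, if_true]
    rw [country_str_tail t ("" ++ " in " ++ c) (by simp)]
    simp [join_and_eq, List.flatMap_map]
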